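-- pv_equiv track=rewrite | github.com/PatGarza20/codingpractice | python/ransomnote.py | canSpell
-- ===== SOURCE A (Python) =====
-- def canSpell(letters, note):
--     # Uses set -> dict to give us a count of how many letters we have.
--     setLetters = sorted(set(letters))
--     dictLetters = dict(zip(setLetters, [0]*len(setLetters)))
--
--     for letter in letters:
--         dictLetters[letter] += 1
--
--     # Converts note to a list w/o spaces.
--     note = list(note.replace(" ",""))
--
--     # If letter in note isn't in our pile, immediately fails.
--     # If dictLetters[letter] goes below zero, fails since there is no more of that letter.
--     for letter in note:
--         if letter not in dictLetters:
--             return False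
--         else:
--             dictLetters[letter] -= 1
--
--             if dictLetters[letter] < 0:
--                 return False
--
--     return True
-- ===== SOURCE B (Python) =====
-- def canSpell(letters, note):
--     need = list(note.replace(" ", ""))
--     pile = list(letters)
--     return all(need.count(c) <= pile.count(c) for c in set(need))
-- ===== Notes on version B (the rewrite author's own statement) =====
-- stated objective: idiomatic
-- what changed: A mutates a per-letter counter dict and early-exits while scanning every note character; B builds no mutable state and compares occurrence counts once per distinct note character via list.count (count-and-compare over set(need)).
import Mathlib
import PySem

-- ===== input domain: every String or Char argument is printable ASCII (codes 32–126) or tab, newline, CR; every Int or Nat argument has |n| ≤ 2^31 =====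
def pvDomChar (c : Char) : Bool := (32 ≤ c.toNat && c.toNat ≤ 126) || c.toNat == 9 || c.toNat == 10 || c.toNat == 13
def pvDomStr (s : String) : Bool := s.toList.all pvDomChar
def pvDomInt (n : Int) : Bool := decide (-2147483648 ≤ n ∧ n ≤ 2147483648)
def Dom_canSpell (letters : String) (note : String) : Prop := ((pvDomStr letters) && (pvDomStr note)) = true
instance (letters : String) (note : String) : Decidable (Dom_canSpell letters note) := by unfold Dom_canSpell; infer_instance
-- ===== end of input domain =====

-- B replaces A's decrement-a-counter, early-exit scan of the note by counting each distinct
-- note character once and comparing counts (objective: alternative/idiomatic decomposition).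

-- ===== PORT A =====
-- A's second loop: decrement the pile count for each note letter, failing fast
def canSpellLoop (d : PySem.Dict Char Int) : List Char → Bool
  | [] => true
  | c :: rest =>
      if !(d.contains c) then false
      else
        let d' := d.modify c 0 (· - 1)
        if d'.getD c 0 < 0 then false
        else canSpellLoop d' rest

def canSpell (letters : String) (note : String) : Bool :=
  let setLetters := PySem.List.sorted (PySem.Set.ofList letters.toList) (fun x => x) false
  let dictLetters : PySem.Dict Char Int :=
    PySem.Dict.ofList (setLetters.zip (List.replicate setLetters.length (0 : Int)))
  let dictLetters := letters.toList.foldl (fun d c => d.modify c 0 (· + 1)) dictLetters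
  let noteL := (PySem.Str.replace note " " "").toList
  canSpellLoop dictLetters noteL

-- ===== PORT B =====
def canSpell_alt (letters : String) (note : String) : Bool :=
  let need := (PySem.Str.replace note " " "").toList
  let pile := letters.toList
  (PySem.Set.ofList need).all (fun c => decide (need.count c ≤ pile.count c))

-- ===== PRECONDITION & SPEC =====
def Spec_canSpell (letters : String) (note : String) (out : Bool) : Prop := out = canSpell_alt letters note
instance (letters : String) (note : String) (out : Bool) : Decidable (Spec_canSpell letters note out) := by unfold Spec_canSpell; infer_instance

-- ===== CLAIM (what is proved, stated in full; the proofs are below) =====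
def Claim_equal_canSpell : Prop := ∀ (letters : String) (note : String), Dom_canSpell letters note → Spec_canSpell letters note (canSpell letters note)

-- ===== LEMMAS AND PROOFS =====

-- characterisation of A's decrement-and-check loop
lemma canSpellLoop_spec (ns : List Char) : ∀ (d : PySem.Dict Char Int),
    canSpellLoop d ns = true ↔ ∀ c ∈ ns, d.contains c = true ∧ (ns.count c : Int) ≤ d.getD c 0 := by
  induction ns with
  | nil => simp [canSpellLoop]
  | cons c rest ih =>
    intro d
    by_cases hc : d.contains c = true
    · simp only [canSpellLoop, hc, Bool.not_true, Bool.false_eq_true, if_false,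
        PySem.Dict.getD_modify_self]
      by_cases hneg : d.getD c 0 - 1 < 0
      · rw [if_pos hneg]
        simp only [Bool.false_eq_true, false_iff]
        intro h
        have h2 := (h c (by simp)).2
        simp only [List.count_cons_self] at h2
        push_cast at h2
        omega
      · rw [if_neg hneg, ih]
        constructor
        · intro h x hx
          rcases List.mem_cons.mp hx with rfl | hxr
          · refine ⟨hc, ?_⟩
            simp only [List.count_cons_self]
            by_cases hm : x ∈ rest
            · have h2 := (h x hm).2
              rw [PySem.Dict.getD_modify, if_pos rfl] at h2
              push_cast
              omega
            · rw [List.count_eq_zero_of_not_mem hm]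
              push_cast
              omega
          · by_cases hxc : x = c
            · subst hxc
              refine ⟨hc, ?_⟩
              have h2 := (h x hxr).2
              rw [PySem.Dict.getD_modify, if_pos rfl] at h2
              simp only [List.count_cons_self]
              push_cast at h2 ⊢
              omega
            · have h2 := h x hxr
              rw [PySem.Dict.getD_modify, if_neg hxc, PySem.Dict.contains_modify] at h2
              simp only [Bool.or_eq_true, beq_iff_eq, hxc, false_or] at h2
              rw [List.count_cons_of_ne (Ne.symm hxc)]
              exact h2
        · intro h x hx
          rw [PySem.Dict.contains_modify, PySem.Dict.getD_modify]
          by_cases hxc : x = c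
          · subst hxc
            have h2 := (h x (by simp)).2
            simp only [List.count_cons_self] at h2
            refine ⟨by simp, ?_⟩
            rw [if_pos rfl]
            push_cast at h2 ⊢
            omega
          · have h2 := h x (List.mem_cons_of_mem _ hx)
            rw [List.count_cons_of_ne (Ne.symm hxc)] at h2
            refine ⟨by simp [h2.1], ?_⟩
            rw [if_neg hxc]
            exact h2.2
    · simp only [canSpellLoop, hc]
      simp only [Bool.not_false, if_true, Bool.false_eq_true, false_iff]
      intro h
      exact hc (h c (by simp)).1

lemma zip_replicate_eq_map (l : List Char) (x : Int) :
    l.zip (List.replicate l.length x) = l.map (fun c => (c, x)) := by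
  induction l with
  | nil => simp
  | cons a t ih => simp [List.replicate_succ, ih]

lemma foldl_insert_zero_getD (l : List Char) : ∀ (d : PySem.Dict Char Int) (c : Char),
    d.getD c 0 = 0 →
    ((l.map (fun c => (c, (0:Int)))).foldl (fun d q => d.insert q.1 q.2) d).getD c 0 = 0 := by
  induction l with
  | nil => intro d c h; simpa using h
  | cons a t ih =>
    intro d c h
    simp only [List.map_cons, List.foldl_cons]
    apply ih
    rw [PySem.Dict.getD_insert]
    split_ifs <;> simp [h]

lemma foldl_insert_contains (l : List Char) : ∀ (d : PySem.Dict Char Int) (c : Char),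
    ((l.map (fun c => (c, (0:Int)))).foldl (fun d q => d.insert q.1 q.2) d).contains c
      = (decide (c ∈ l) || d.contains c) := by
  induction l with
  | nil => simp
  | cons a t ih =>
    intro d c
    simp only [List.map_cons, List.foldl_cons, ih, PySem.Dict.contains_insert]
    by_cases hca : c = a
    · subst hca; simp [List.mem_cons]
    · simp [List.mem_cons, hca, show (c == a) = false from beq_eq_false_iff_ne.mpr hca]

-- ===== VERDICT (by name: the statement is the Claim_ definition above) =====
theorem canSpell_spec : Claim_equal_canSpell := by
  intro letters note _
  unfold Spec_canSpell canSpell canSpell_alt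
  simp only []
  rw [Bool.eq_iff_iff]
  set need := (PySem.Str.replace note " " "").toList with hneed
  set ls := letters.toList with hls
  set setL := PySem.List.sorted (PySem.Set.ofList ls) (fun x => x) false with hsetL
  have hmemL : ∀ c : Char, c ∈ setL ↔ c ∈ ls := by
    intro c
    rw [hsetL]
    rw [(PySem.List.sorted_perm (PySem.Set.ofList ls) (fun x => x) false).mem_iff]
    exact PySem.Set.mem_ofList ls c
  have hzip := zip_replicate_eq_map setL 0
  have hgetD0 : ∀ c : Char,
      (PySem.Dict.ofList (setL.zip (List.replicate setL.length (0:Int)))).getD c 0 = 0 := by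
    intro c
    rw [hzip]
    show ((setL.map (fun c => (c, (0:Int)))).foldl (fun d q => d.insert q.1 q.2) PySem.Dict.empty).getD c 0 = 0
    · exact foldl_insert_zero_getD setL PySem.Dict.empty c (by simp [pysem])
  have hcont0 : ∀ c : Char,
      (PySem.Dict.ofList (setL.zip (List.replicate setL.length (0:Int)))).contains c
        = decide (c ∈ ls) := by
    intro c
    rw [hzip]
    show ((setL.map (fun c => (c, (0:Int)))).foldl (fun d q => d.insert q.1 q.2) PySem.Dict.empty).contains c = _
    rw [foldl_insert_contains]
    simp [pysem, hmemL c]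
  set d0 := PySem.Dict.ofList (setL.zip (List.replicate setL.length (0:Int))) with hd0
  set d1 := ls.foldl (fun d c => d.modify c 0 (· + 1)) d0 with hd1
  have hgetD1 : ∀ c : Char, d1.getD c 0 = (ls.count c : Int) := by
    intro c
    rw [hd1, PySem.Dict.getD_foldl_modify_add_one, hgetD0]
    ring
  have hcont1 : ∀ c : Char, d1.contains c = decide (c ∈ ls) := by
    intro c
    rw [hd1]
    rw [Bool.eq_iff_iff, PySem.Dict.contains_iff_mem_keys,
      PySem.Dict.keys_foldl_modify ls 0 (fun _ _ => (· + 1)) d0,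
      PySem.Set.mem_update]
    rw [decide_eq_true_eq]
    constructor
    · rintro (hk | hk)
      · have := (PySem.Dict.contains_iff_mem_keys d0 c).mpr hk
        rw [hcont0, decide_eq_true_eq] at this
        exact this
      · exact hk
    · exact fun hk => Or.inr hk
  rw [canSpellLoop_spec]
  constructor
  · intro h
    simp only [List.all_eq_true]
    intro c hc
    rw [PySem.Set.mem_ofList] at hc
    have h2 := h c hc
    rw [hcont1, hgetD1] at h2
    simp only [decide_eq_true_eq] at h2 ⊢
    exact_mod_cast h2.2
  · intro h c hc
    simp only [List.all_eq_true] at h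
    have h2 := h c (by rw [PySem.Set.mem_ofList]; exact hc)
    simp only [decide_eq_true_eq] at h2
    have hcl : c ∈ ls := by
      have : 0 < need.count c := List.count_pos_iff.mpr hc
      have : 0 < ls.count c := by omega
      exact List.count_pos_iff.mp this
    rw [hcont1, hgetD1]
    refine ⟨by simp [hcl], by exact_mod_cast h2⟩
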